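-- pv_equiv track=rewrite | github.com/d0o0yle/programmers | venv/level2/openchatroom.py | solution
-- ===== SOURCE A (Python) =====
-- def solution(record):
--     answer = []
--
--     users = dict()
--     commands = []
--
--     for aRecord in record:
--         contents = aRecord.split()
--         command = contents[0]
--
--         if command == 'Enter':
--             users[contents[1]] = contents[2]
--             commands.append((command, contents[1]))
--         elif command == 'Change':
--             users[contents[1]] = contents[2]
--         elif command == 'Leave':
--             commands.append((command, contents[1]))
--
--     for command in commands:
--         if command[0] == 'Enter':
--             answer.append('{}님이 들어왔습니다.'.format(users[command[1]]))
--         elif command[0] == 'Leave':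
--             answer.append('{}님이 나갔습니다.'.format(users[command[1]]))
--
--
--     return answer
-- ===== SOURCE B (Python) =====
-- def solution(record):
--     # Group the output slots per user id, then scatter-fill a preallocated
--     # answer list user by user (no commands list, no sequential append pass).
--     slots = {}   # id -> list of (answer index, message suffix)
--     names = {}   # id -> final username
--     n = 0
--     for line in record:
--         t = line.split()
--         if t[0] == 'Enter' or t[0] == 'Leave':
--             suffix = '님이 들어왔습니다.' if t[0] == 'Enter' else '님이 나갔습니다.'
--             slots.setdefault(t[1], []).append((n, suffix))
--             n += 1
--         if t[0] == 'Enter' or t[0] == 'Change':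
--             names[t[1]] = t[2]
--     answer = [''] * n
--     for uid, fills in slots.items():
--         for i, suffix in fills:
--             answer[i] = names[uid] + suffix
--     return answer
-- ===== Notes on version B (the rewrite author's own statement) =====
-- stated objective: alternative
-- what changed: B drops A's commands list and sequential append pass: during the single scan it groups output slot indices (with their message suffix) per user id in a dict, then scatter-fills a preallocated answer list user by user via index assignment.
import Mathlib
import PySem

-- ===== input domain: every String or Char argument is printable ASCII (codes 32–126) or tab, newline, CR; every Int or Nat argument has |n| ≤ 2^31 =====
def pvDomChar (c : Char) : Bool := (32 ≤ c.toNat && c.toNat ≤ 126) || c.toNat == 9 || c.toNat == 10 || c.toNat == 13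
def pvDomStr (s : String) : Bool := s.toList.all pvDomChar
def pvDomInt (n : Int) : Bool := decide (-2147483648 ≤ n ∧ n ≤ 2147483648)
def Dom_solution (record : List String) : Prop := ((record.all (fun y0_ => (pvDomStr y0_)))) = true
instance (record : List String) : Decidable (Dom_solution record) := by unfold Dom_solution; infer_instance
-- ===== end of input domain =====

-- B replaces A's commands list + sequential append pass by grouping the output slot
-- indices per user id and scatter-filling a preallocated answer list user by user.

-- ===== PORT A =====
def solution (record : List String) : List String :=
  let st := record.foldl
    (fun (st : PySem.Dict String String × List (String × String)) aRecord =>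
      let contents := PySem.Str.split₀ aRecord
      let command := PySem.List.pyGetD contents 0 ""   -- contents[0]; Pre_ excludes the IndexError
      if command = "Enter" then
        (st.1.insert (PySem.List.pyGetD contents 1 "") (PySem.List.pyGetD contents 2 ""),
         st.2 ++ [(command, PySem.List.pyGetD contents 1 "")])
      else if command = "Change" then
        (st.1.insert (PySem.List.pyGetD contents 1 "") (PySem.List.pyGetD contents 2 ""), st.2)
      else if command = "Leave" then
        (st.1, st.2 ++ [(command, PySem.List.pyGetD contents 1 "")])
      else st)
    (PySem.Dict.empty, ([] : List (String × String)))
  st.2.foldl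
    (fun answer command =>
      if command.1 = "Enter" then answer ++ [(st.1.getD command.2 "") ++ "님이 들어왔습니다."]  -- users[id]; Pre_ excludes the KeyError
      else if command.1 = "Leave" then answer ++ [(st.1.getD command.2 "") ++ "님이 나갔습니다."]
      else answer)
    []

-- ===== PORT B =====
def solution_alt (record : List String) : List String :=
  let st := record.foldl
    (fun (st : PySem.Dict String (List (Int × String)) × PySem.Dict String String × Int) line =>
      let t := PySem.Str.split₀ line
      let c := PySem.List.pyGetD t 0 ""   -- t[0]; Pre_ excludes the IndexError
      let st :=
        if c = "Enter" ∨ c = "Leave" then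
          let suffix := if c = "Enter" then "님이 들어왔습니다." else "님이 나갔습니다."
          -- slots.setdefault(t[1], []).append((n, suffix)): exact — an existing key keeps
          -- its position with the pair appended to its list, a new key appends at the end
          (st.1.insert (PySem.List.pyGetD t 1 "") (st.1.getD (PySem.List.pyGetD t 1 "") [] ++ [(st.2.2, suffix)]),
           st.2.1, st.2.2 + 1)
        else st
      if c = "Enter" ∨ c = "Change" then
        (st.1, st.2.1.insert (PySem.List.pyGetD t 1 "") (PySem.List.pyGetD t 2 ""), st.2.2)
      else st)
    (PySem.Dict.empty, PySem.Dict.empty, 0)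
  st.1.items.foldl
    (fun answer p =>
      -- names[uid]: Pre_ excludes the KeyError; answer[i] = …: i is always in range
      p.2.foldl (fun a q => PySem.List.pySetD a q.1 (st.2.1.getD p.1 "" ++ q.2)) answer)
    (List.replicate st.2.2.toNat "")

-- ===== PRECONDITION & SPEC =====
-- Pre_ excludes exactly the inputs where Python A raises: a line whose split() is empty
-- (IndexError on contents[0]), an Enter/Change line with fewer than 3 tokens (IndexError),
-- a Leave line with fewer than 2 tokens (IndexError), or a Leave whose id no Enter/Change
-- line mentions (KeyError on users[contents[1]]).
def Pre_solution (record : List String) : Prop :=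
  -- Admitted, for example: ["Enter u1 Muzi", "Enter u2 Prodo", "Change u1 Ryan", "Leave u1",
  -- "Leave u2", "Enter u3 Con", "Change u2 Neo"] — and lines with any other command word,
  -- such as "Hi there x", "hello" or "bye", which A silently ignores.
  -- Excluded, for example: ["Enter"], ["Enter u1"], ["Change u3"], ["Leave"] (each an
  -- IndexError in A) and ["Leave u9"] (KeyError: u9 never entered).
  ∀ line ∈ record,
    (PySem.Str.split₀ line) ≠ [] ∧
    (((PySem.Str.split₀ line)[0]? = some "Enter" ∨ (PySem.Str.split₀ line)[0]? = some "Change") →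
       3 ≤ (PySem.Str.split₀ line).length) ∧
    ((PySem.Str.split₀ line)[0]? = some "Leave" →
       2 ≤ (PySem.Str.split₀ line).length ∧
       ∃ l' ∈ record,
         ((PySem.Str.split₀ l')[0]? = some "Enter" ∨ (PySem.Str.split₀ l')[0]? = some "Change") ∧
         (PySem.Str.split₀ l')[1]? = (PySem.Str.split₀ line)[1]?)
instance (record : List String) : Decidable (Pre_solution record) := by
  unfold Pre_solution; infer_instance

def pvWitness_solution : List String :=
  ["Enter uid1 Muzi", "Enter uid2 Prodo", "Leave uid1", "Enter uid1 Prodo", "Change uid2 Ryan"]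

def Spec_solution (record : List String) (out : List String) : Prop := out = solution_alt record
instance (record : List String) (out : List String) : Decidable (Spec_solution record out) := by
  unfold Spec_solution; infer_instance

-- ===== CLAIM (what is proved, stated in full; the proofs are below) =====
def Claim_equal_solution : Prop :=
  ∀ (record : List String), Dom_solution record → Pre_solution record →
    Spec_solution record (solution record)

-- ===== LEMMAS AND PROOFS =====

def pvC (line : String) : String := PySem.List.pyGetD (PySem.Str.split₀ line) 0 ""
def pvId (line : String) : String := PySem.List.pyGetD (PySem.Str.split₀ line) 1 ""
def pvNm (line : String) : String := PySem.List.pyGetD (PySem.Str.split₀ line) 2 ""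

-- A's dict step / commands step (the two independent components of A's pair fold)
def pvFA (d : PySem.Dict String String) (line : String) : PySem.Dict String String :=
  if pvC line = "Enter" then d.insert (pvId line) (pvNm line)
  else if pvC line = "Change" then d.insert (pvId line) (pvNm line)
  else if pvC line = "Leave" then d else d

def pvGl (line : String) : List (String × String) :=
  if pvC line = "Enter" then [(pvC line, pvId line)]
  else if pvC line = "Change" then []
  else if pvC line = "Leave" then [(pvC line, pvId line)]
  else []

def pvMsg (u : PySem.Dict String String) (cmd : String × String) : List String :=
  if cmd.1 = "Enter" then [(u.getD cmd.2 "") ++ "님이 들어왔습니다."]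
  else if cmd.1 = "Leave" then [(u.getD cmd.2 "") ++ "님이 나갔습니다."]
  else []

-- the qualifying lines: (id, message suffix) for Enter/Leave, in record order
def pvQf (line : String) : Option (String × String) :=
  if pvC line = "Enter" then some (pvId line, "님이 들어왔습니다.")
  else if pvC line = "Leave" then some (pvId line, "님이 나갔습니다.")
  else none

def pvQ (r : List String) : List (String × String) := r.filterMap pvQf

def pvUsers (r : List String) : PySem.Dict String String := r.foldl pvFA PySem.Dict.empty

-- the common output
def pvT (r : List String) : List String :=
  (pvQ r).map (fun p => (pvUsers r).getD p.1 "" ++ p.2)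

-- ---------- A-side ----------

theorem pvStepA_eq :
    (fun (st : PySem.Dict String String × List (String × String)) aRecord =>
      let contents := PySem.Str.split₀ aRecord
      let command := PySem.List.pyGetD contents 0 ""
      if command = "Enter" then
        (st.1.insert (PySem.List.pyGetD contents 1 "") (PySem.List.pyGetD contents 2 ""),
         st.2 ++ [(command, PySem.List.pyGetD contents 1 "")])
      else if command = "Change" then
        (st.1.insert (PySem.List.pyGetD contents 1 "") (PySem.List.pyGetD contents 2 ""), st.2)
      else if command = "Leave" then
        (st.1, st.2 ++ [(command, PySem.List.pyGetD contents 1 "")])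
      else st) =
    (fun st line => (pvFA st.1 line, st.2 ++ pvGl line)) := by
  funext st line
  simp only [pvFA, pvGl, pvC, pvId, pvNm]
  split_ifs <;> simp

theorem pvGl_flatMap (u : PySem.Dict String String) (l : String) :
    (pvGl l).flatMap (pvMsg u) = pvMsg u (pvC l, pvId l) := by
  unfold pvGl
  split_ifs with h1 h2 h3 <;> simp_all [pvMsg]

theorem solution_eq_flatMap (record : List String) :
    solution record =
      record.flatMap (fun l => pvMsg (pvUsers record) (pvC l, pvId l)) := by
  unfold solution
  rw [pvStepA_eq,
      PySem.List.foldl_prod_mk (f := pvFA) (g := fun cs line => cs ++ pvGl line)]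
  simp only
  rw [PySem.List.foldl_append_eq_flatMap, List.nil_append]
  have hstep : (fun (answer : List String) (command : String × String) =>
      if command.1 = "Enter" then
        answer ++ [((record.foldl pvFA PySem.Dict.empty).getD command.2 "") ++ "님이 들어왔습니다."]
      else if command.1 = "Leave" then
        answer ++ [((record.foldl pvFA PySem.Dict.empty).getD command.2 "") ++ "님이 나갔습니다."]
      else answer) =
      (fun answer command => answer ++ pvMsg (record.foldl pvFA PySem.Dict.empty) command) := by
    funext ans cmd; unfold pvMsg; split_ifs <;> simp
  rw [hstep, PySem.List.foldl_append_eq_flatMap, List.nil_append, List.flatMap_assoc]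
  congr 1; funext l
  exact pvGl_flatMap _ l

theorem pvMsg_eq_qf (u : PySem.Dict String String) (l : String) :
    pvMsg u (pvC l, pvId l) = ((pvQf l).map (fun p => u.getD p.1 "" ++ p.2)).toList := by
  unfold pvMsg pvQf
  split_ifs <;> simp

theorem pvFlatMap_msg (u : PySem.Dict String String) (r : List String) :
    r.flatMap (fun l => pvMsg u (pvC l, pvId l)) =
      (r.filterMap pvQf).map (fun p => u.getD p.1 "" ++ p.2) := by
  induction r with
  | nil => simp
  | cons l rest ih =>
    rw [List.flatMap_cons, List.filterMap_cons, pvMsg_eq_qf]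
    cases h : pvQf l with
    | none => simp [ih]
    | some p => simp [ih]

theorem solution_eq_pvT (record : List String) : solution record = pvT record := by
  rw [solution_eq_flatMap]
  exact pvFlatMap_msg (pvUsers record) record

-- ---------- B-side ----------

def pvInit : PySem.Dict String (List (Int × String)) × PySem.Dict String String × Int :=
  (PySem.Dict.empty, PySem.Dict.empty, 0)

def pvStepB (st : PySem.Dict String (List (Int × String)) × PySem.Dict String String × Int)
    (line : String) :
    PySem.Dict String (List (Int × String)) × PySem.Dict String String × Int :=
  let t := PySem.Str.split₀ line
  let c := PySem.List.pyGetD t 0 ""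
  let st :=
    if c = "Enter" ∨ c = "Leave" then
      let suffix := if c = "Enter" then "님이 들어왔습니다." else "님이 나갔습니다."
      (st.1.insert (PySem.List.pyGetD t 1 "") (st.1.getD (PySem.List.pyGetD t 1 "") [] ++ [(st.2.2, suffix)]),
       st.2.1, st.2.2 + 1)
    else st
  if c = "Enter" ∨ c = "Change" then
    (st.1, st.2.1.insert (PySem.List.pyGetD t 1 "") (PySem.List.pyGetD t 2 ""), st.2.2)
  else st

theorem solution_alt_def (record : List String) :
    solution_alt record =
      (let st := record.foldl pvStepB pvInit
       st.1.items.foldl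
         (fun answer p =>
           p.2.foldl (fun a q => PySem.List.pySetD a q.1 (st.2.1.getD p.1 "" ++ q.2)) answer)
         (List.replicate st.2.2.toNat "")) := rfl

theorem pvStepB_fst (st : PySem.Dict String (List (Int × String)) × PySem.Dict String String × Int)
    (l : String) :
    (pvStepB st l).1 = match pvQf l with
      | some (i, s) => st.1.insert i (st.1.getD i [] ++ [(st.2.2, s)])
      | none => st.1 := by
  unfold pvStepB pvQf pvC pvId
  split_ifs <;> simp_all <;> split_ifs <;> simp_all

theorem pvStepB_names (st : PySem.Dict String (List (Int × String)) × PySem.Dict String String × Int)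
    (l : String) : (pvStepB st l).2.1 = pvFA st.2.1 l := by
  unfold pvStepB pvFA pvC pvId pvNm
  split_ifs <;> simp_all

theorem pvStepB_count (st : PySem.Dict String (List (Int × String)) × PySem.Dict String String × Int)
    (l : String) :
    (pvStepB st l).2.2 = st.2.2 + (match pvQf l with | some _ => (1 : Int) | none => 0) := by
  unfold pvStepB pvQf pvC
  split_ifs <;> simp_all <;> split_ifs <;> simp_all

theorem pvMem_getD {d : PySem.Dict String (List (Int × String))} {i : String} {q : Int × String}
    (hq : q ∈ d.getD i []) : (i, d.getD i []) ∈ d.items := by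
  cases hg : d.get? i with
  | none => rw [PySem.Dict.getD_eq_get?_getD, hg] at hq; simp at hq
  | some g =>
    have hD : d.getD i [] = g := by rw [PySem.Dict.getD_eq_get?_getD, hg]; rfl
    rw [hD]
    exact PySem.Dict.mem_items_of_get?_eq_some d hg

-- the phase-1 invariant
theorem pvInvariant (r : List String) :
    (r.foldl pvStepB pvInit).2.2 = ((pvQ r).length : Int) ∧
    (r.foldl pvStepB pvInit).2.1 = pvUsers r ∧
    (∀ p ∈ (r.foldl pvStepB pvInit).1.items, ∀ q ∈ p.2,
        ∃ (j : Nat) (h : j < (pvQ r).length), q.1 = (j : Int) ∧ (pvQ r)[j] = (p.1, q.2)) ∧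
    (∀ (j : Nat) (h : j < (pvQ r).length),
        ((j : Int), (pvQ r)[j].2) ∈ (r.foldl pvStepB pvInit).1.getD (pvQ r)[j].1 []) := by
  induction r using List.reverseRecOn with
  | nil =>
    refine ⟨rfl, rfl, ?_, ?_⟩ <;>
      simp [pvInit, pvQ, PySem.Dict.empty]
  | append_singleton r l ih =>
    obtain ⟨ih1, ih2, ih3, ih4⟩ := ih
    have hfold : (r ++ [l]).foldl pvStepB pvInit = pvStepB (r.foldl pvStepB pvInit) l := by
      rw [List.foldl_append, List.foldl_cons, List.foldl_nil]
    have h1 : List.filterMap pvQf [l] = (pvQf l).toList := by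
      cases h : pvQf l <;> simp [h]
    have hQ : pvQ (r ++ [l]) = pvQ r ++ (pvQf l).toList := by
      rw [pvQ, List.filterMap_append, h1]; rfl
    have hU : pvUsers (r ++ [l]) = pvFA (pvUsers r) l := by
      simp [pvUsers, List.foldl_append]
    rw [hfold, hQ, hU, pvStepB_fst, pvStepB_names, pvStepB_count, ih2]
    cases hq : pvQf l with
    | none =>
      simp only [Option.toList_none, List.append_nil]
      refine ⟨by simpa using ih1, by trivial, ih3, ih4⟩
    | some p =>
      obtain ⟨i, s⟩ := p
      simp only [Option.toList_some]
      have hg0 : ∀ q ∈ (r.foldl pvStepB pvInit).1.getD i [],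
          ∃ (j : Nat) (h : j < (pvQ r).length), q.1 = (j : Int) ∧ (pvQ r)[j] = (i, q.2) := by
        intro q hq'
        exact ih3 _ (pvMem_getD hq') q hq'
      have hlast : ∀ (h : (pvQ r).length < (pvQ r ++ [(i, s)]).length),
          (pvQ r ++ [(i, s)])[(pvQ r).length] = (i, s) := by
        intro h; simp
      refine ⟨?_, by trivial, ?_, ?_⟩
      · rw [ih1]; simp
      · intro p hp q hq'
        rcases (PySem.Dict.mem_items_insert _ _ _ _).mp hp with rfl | ⟨hp', hpne⟩
        · rcases List.mem_append.mp hq' with hqg | hqs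
          · obtain ⟨j, hjN, h1, h2⟩ := hg0 q hqg
            refine ⟨j, by simp; omega, h1, ?_⟩
            rw [List.getElem_append_left hjN, h2]
          · simp only [List.mem_singleton] at hqs
            subst hqs
            refine ⟨(pvQ r).length, by simp, by simpa using ih1, ?_⟩
            rw [hlast (by simp)]
        · obtain ⟨j, hjN, h1, h2⟩ := ih3 p hp' q hq'
          refine ⟨j, by simp; omega, h1, ?_⟩
          rw [List.getElem_append_left hjN, h2]
      · intro j h
        have hlen2 : (pvQ r ++ [(i, s)]).length = (pvQ r).length + 1 := by simp
        rcases Nat.lt_succ_iff_lt_or_eq.mp (by omega : j < (pvQ r).length + 1) with hj | rfl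
        · have hget : (pvQ r ++ [(i, s)])[j] = (pvQ r)[j] := List.getElem_append_left hj
          rw [hget, PySem.Dict.getD_insert]
          by_cases hk : (pvQ r)[j].1 = i
          · rw [if_pos hk]
            refine List.mem_append_left _ ?_
            have hm := ih4 j hj
            rwa [hk] at hm
          · rw [if_neg hk]
            exact ih4 j hj
        · rw [hlast (by omega), PySem.Dict.getD_insert, if_pos rfl]
          refine List.mem_append_right _ ?_
          simp [ih1]

-- scatter fill: each write puts the target value at its index
theorem pvScatterLen (fills : List (Int × String)) (L0 : List String) :
    (fills.foldl (fun a q => PySem.List.pySetD a q.1 q.2) L0).length = L0.length := by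
  induction fills generalizing L0 with
  | nil => rfl
  | cons f fs ih => simp [List.foldl_cons, ih, PySem.List.length_pySetD]

theorem pvScatter (T : List String) (fills : List (Int × String)) (L0 : List String)
    (hlen : L0.length = T.length)
    (hcor : ∀ f ∈ fills, ∃ (j : Nat) (h : j < T.length), f.1 = (j : Int) ∧ f.2 = T[j]) :
    ∀ (j : Nat) (hj : j < T.length),
      (fills.foldl (fun a q => PySem.List.pySetD a q.1 q.2) L0)[j]? =
        if (∃ f ∈ fills, f.1 = (j : Int)) then some (T[j]'hj) else L0[j]? := by
  induction fills generalizing L0 with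
  | nil => intro j hj; simp
  | cons f fs ih =>
    intro j hj
    obtain ⟨j0, hj0, hf1, hf2⟩ := hcor f (by simp)
    have hset : PySem.List.pySetD L0 f.1 f.2 = L0.set j0 f.2 := by
      rw [hf1, PySem.List.pySetD_natCast]
    have hlen' : (L0.set j0 f.2).length = T.length := by simp [hlen]
    have ihj := ih (L0.set j0 f.2) hlen'
      (fun g hg => hcor g (List.mem_cons_of_mem _ hg)) j hj
    rw [List.foldl_cons, hset, ihj]
    by_cases hmem : ∃ g ∈ fs, g.1 = (j : Int)
    · rw [if_pos hmem]
      obtain ⟨g, hg, hg1⟩ := hmem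
      rw [if_pos ⟨g, List.mem_cons_of_mem _ hg, hg1⟩]
    · rw [if_neg hmem]
      by_cases hfj : f.1 = (j : Int)
      · have hjj : j = j0 := by omega
        subst hjj
        rw [List.getElem?_set_self (by omega), if_pos ⟨f, List.mem_cons_self, hfj⟩, hf2]
      · rw [List.getElem?_set_ne (by omega)]
        rw [if_neg (by rintro ⟨g, hg, hg1⟩; rcases List.mem_cons.mp hg with rfl | hg' ; exact hfj hg1; exact hmem ⟨g, hg', hg1⟩)]

theorem pvFoldGroups (name : String → String) (gs : List (String × List (Int × String)))
    (L : List String) :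
    gs.foldl (fun answer p =>
        p.2.foldl (fun a q => PySem.List.pySetD a q.1 (name p.1 ++ q.2)) answer) L
      = (gs.flatMap (fun p => p.2.map (fun q => (q.1, name p.1 ++ q.2)))).foldl
          (fun a q => PySem.List.pySetD a q.1 q.2) L := by
  induction gs generalizing L with
  | nil => rfl
  | cons p ps ih =>
    rw [List.foldl_cons, List.flatMap_cons, List.foldl_append, ih, List.foldl_map]

theorem solution_alt_eq_pvT (record : List String) : solution_alt record = pvT record := by
  obtain ⟨h1, h2, h3, h4⟩ := pvInvariant record
  rw [solution_alt_def]
  simp only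
  rw [pvFoldGroups (fun k => (record.foldl pvStepB pvInit).2.1.getD k "")]
  have hT : (pvT record).length = (pvQ record).length := by simp [pvT]
  have hL0 : (List.replicate (record.foldl pvStepB pvInit).2.2.toNat "").length
      = (pvT record).length := by
    simp [hT, h1]
  have hcor : ∀ f ∈ (record.foldl pvStepB pvInit).1.items.flatMap
        (fun p => p.2.map (fun q =>
          (q.1, (record.foldl pvStepB pvInit).2.1.getD p.1 "" ++ q.2))),
      ∃ (j : Nat) (h : j < (pvT record).length), f.1 = (j : Int) ∧ f.2 = (pvT record)[j] := by
    intro f hf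
    simp only [List.mem_flatMap, List.mem_map] at hf
    obtain ⟨p, hp, q, hq, rfl⟩ := hf
    obtain ⟨j, hj, hq1, hq2⟩ := h3 p hp q hq
    refine ⟨j, by omega, hq1, ?_⟩
    have : (pvT record)[j]'(by omega) =
        (pvUsers record).getD ((pvQ record)[j]'hj).1 "" ++ ((pvQ record)[j]'hj).2 := by
      simp [pvT]
    rw [this, hq2, h2]
  have hcov : ∀ (j : Nat), j < (pvT record).length →
      ∃ f ∈ (record.foldl pvStepB pvInit).1.items.flatMap
        (fun p => p.2.map (fun q =>
          (q.1, (record.foldl pvStepB pvInit).2.1.getD p.1 "" ++ q.2))),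
        f.1 = (j : Int) := by
    intro j hj
    have hj' : j < (pvQ record).length := by omega
    have hmem := h4 j hj'
    have hitem := pvMem_getD hmem
    refine ⟨((j : Int),
        (record.foldl pvStepB pvInit).2.1.getD ((pvQ record)[j]'hj').1 ""
          ++ ((pvQ record)[j]'hj').2), ?_, rfl⟩
    exact List.mem_flatMap.mpr ⟨_, hitem, List.mem_map.mpr ⟨_, hmem, rfl⟩⟩
  apply List.ext_getElem?
  intro j
  by_cases hj : j < (pvT record).length
  · rw [pvScatter (pvT record) _ _ hL0 hcor j hj, if_pos (hcov j hj),
        List.getElem?_eq_getElem hj]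
  · rw [List.getElem?_eq_none, List.getElem?_eq_none (by omega)]
    rw [pvScatterLen]
    omega

-- ===== VERDICT (by name: the statement is the Claim_ definition above) =====
theorem solution_spec : Claim_equal_solution := by
  intro record _ _
  unfold Spec_solution
  rw [solution_eq_pvT, solution_alt_eq_pvT]
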